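-- pv_equiv track=rewrite | github.com/981377660LMT/algorithm-study | 22_专题/前缀与差分/前缀和/左右端点相等且等于中间和的子数组个数.py | countGoodSubarray
-- ===== SOURCE A (Python) =====
-- from collections import defaultdict
-- from typing import List
--
-- def countGoodSubarray(nums: List[int]) -> int:
--     preSum = defaultdict(dict)
--     res, curSum = 0, 0
--     for num in nums:
--         curSum += num
--         mp = preSum[num]
--         target = curSum - 2 * num
--         if target in mp:
--             res += mp[target]
--         mp[curSum] = mp.get(curSum, 0) + 1
--     return res
-- ===== SOURCE B (Python) =====
-- from typing import List
--
--
-- def countGoodSubarray(nums: List[int]) -> int: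
--     # Brute force over endpoint pairs: pre[k] = sum(nums[:k]); the pair (i, j)
--     # is good iff nums[i] == nums[j] and the middle sum pre[j] - pre[i+1] equals it.
--     pre = [0]
--     for x in nums:
--         pre.append(pre[-1] + x)
--     n = len(nums)
--     res = 0
--     for j in range(n):
--         for i in range(j):
--             if nums[i] == nums[j] and pre[j] - pre[i + 1] == nums[j]:
--                 res += 1
--     return res
-- ===== Notes on version B (the rewrite author's own statement) =====
-- stated objective: simpler
-- what changed: A makes one pass maintaining a dict-of-dicts of prefix-sum counters keyed by element value; B drops the hash maps entirely and enumerates all endpoint pairs (i, j) over a plain prefix-sum array, testing each pair directly.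
import Mathlib
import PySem

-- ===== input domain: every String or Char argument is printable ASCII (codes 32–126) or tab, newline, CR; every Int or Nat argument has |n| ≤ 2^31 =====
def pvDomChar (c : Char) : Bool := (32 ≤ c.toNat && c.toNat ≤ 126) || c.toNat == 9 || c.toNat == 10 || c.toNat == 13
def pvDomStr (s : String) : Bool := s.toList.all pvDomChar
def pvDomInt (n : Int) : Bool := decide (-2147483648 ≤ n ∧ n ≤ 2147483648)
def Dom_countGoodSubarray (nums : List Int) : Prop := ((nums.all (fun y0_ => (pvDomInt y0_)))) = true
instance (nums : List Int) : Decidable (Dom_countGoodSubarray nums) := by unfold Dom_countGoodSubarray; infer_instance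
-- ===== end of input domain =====

-- B replaces A's single hash-map pass (dict-of-dicts of prefix-sum counters) by a plain
-- quadratic enumeration of endpoint pairs over a prefix-sum array: simpler, no hashing.

-- ===== PORT A =====
def pvAStep (st : Int × Int × PySem.Dict Int (PySem.Dict Int Int)) (num : Int) :
    Int × Int × PySem.Dict Int (PySem.Dict Int Int) :=
  let curSum := st.2.1 + num
  let preSum := st.2.2
  let mp := preSum.getD num PySem.Dict.empty   -- defaultdict access; re-inserted below
  let target := curSum - 2 * num
  let res := st.1 + (if mp.contains target then mp.getD target 0 else 0)
  let mp := mp.insert curSum (mp.getD curSum 0 + 1)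
  (res, curSum, preSum.insert num mp)

def countGoodSubarray (nums : List Int) : Int :=
  (nums.foldl pvAStep (0, 0, PySem.Dict.empty)).1

-- ===== PORT B =====
def countGoodSubarray_alt (nums : List Int) : Int :=
  let pre := nums.foldl (fun acc x => acc ++ [PySem.List.pyGetD acc (-1) 0 + x]) [0]
  let n := PySem.List.len nums
  (PySem.List.pyRange 0 n 1).foldl (fun res j =>
    (PySem.List.pyRange 0 j 1).foldl (fun res i =>
      if PySem.List.pyGetD nums i 0 = PySem.List.pyGetD nums j 0 ∧
         PySem.List.pyGetD pre j 0 - PySem.List.pyGetD pre (i + 1) 0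
           = PySem.List.pyGetD nums j 0
      then res + 1 else res) res) 0

-- ===== PRECONDITION & SPEC =====
def Spec_countGoodSubarray (nums : List Int) (out : Int) : Prop := out = countGoodSubarray_alt nums
instance (nums : List Int) (out : Int) : Decidable (Spec_countGoodSubarray nums out) := by unfold Spec_countGoodSubarray; infer_instance

-- ===== CLAIM (what is proved, stated in full; the proofs are below) =====
def Claim_equal_countGoodSubarray : Prop := ∀ (nums : List Int), Dom_countGoodSubarray nums → Spec_countGoodSubarray nums (countGoodSubarray nums)

-- ===== LEMMAS AND PROOFS =====

-- the (element, inclusive prefix sum) trace of the input, starting from running sum c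
def pvPairs (c : Int) : List Int → List (Int × Int)
  | [] => []
  | n :: r => (n, c + n) :: pvPairs (c + n) r

-- the number of good ordered pairs contributed by a trace suffix, given the seen prefix
def pvCountGo (seen : List (Int × Int)) : List (Int × Int) → Int
  | [] => 0
  | p :: r => (seen.count (p.1, p.2 - 2 * p.1) : Int) + pvCountGo (seen ++ [p]) r

-- the ordered prefix sums recorded for value v in a trace (A's per-value counter contents)
def pvSums (hist : List (Int × Int)) (v : Int) : List Int :=
  (hist.filter (fun p => p.1 == v)).map Prod.snd

lemma pvPairs_length (c : Int) (l : List Int) : (pvPairs c l).length = l.length := by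
  induction l generalizing c with
  | nil => rfl
  | cons x r ih => simp [pvPairs, ih]

lemma pvPairs_getElem (c : Int) (l : List Int) (k : Nat) (h : k < l.length) :
    (pvPairs c l)[k]'(by rw [pvPairs_length]; exact h)
      = (l[k], c + (l.take (k + 1)).sum) := by
  induction l generalizing c k with
  | nil => cases h
  | cons x r ih =>
    cases k with
    | zero => simp [pvPairs]
    | succ k =>
      have := ih (c + x) k (by simpa using h)
      simp [pvPairs, this, add_assoc]

lemma count_pvSums (hist : List (Int × Int)) (a x : Int) :
    (pvSums hist a).count x = hist.count (a, x) := by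
  induction hist with
  | nil => rfl
  | cons p r ih =>
    by_cases h : p.1 = a
    · by_cases h2 : p.2 = x
      · have : p = (a, x) := by rw [Prod.ext_iff]; exact ⟨h, h2⟩
        simp [pvSums, this, ← ih]
      · have : p ≠ (a, x) := by simp [Prod.ext_iff, h2]
        simp [pvSums, h, h2, this, ← ih]
    · have : p ≠ (a, x) := by simp [Prod.ext_iff, h]
      simp [pvSums, h, this, ← ih]

lemma pvSums_append (hist : List (Int × Int)) (a s v : Int) :
    pvSums (hist ++ [(a, s)]) v = pvSums hist v ++ if v = a then [s] else [] := by
  simp only [pvSums, List.filter_append, List.map_append]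
  by_cases h : v = a
  · subst h; simp
  · have h' := Ne.symm h
    simp [h, h']

lemma pv_counter_if (l : List Int) (t : Int) :
    (if (PySem.Dict.counter l).contains t then (PySem.Dict.counter l).getD t 0 else 0)
      = (l.count t : Int) := by
  by_cases h : (PySem.Dict.counter l).contains t = true
  · simp [h, PySem.Dict.getD_counter]
  · have hnot : t ∉ l := by
      intro hm
      apply h
      rw [PySem.Dict.contains_counter]
      simpa using hm
    simp [h, List.count_eq_zero_of_not_mem hnot]

-- A's loop, characterized against the trace
lemma pvAloop (l : List Int) (r c : Int) (d : PySem.Dict Int (PySem.Dict Int Int))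
    (hist : List (Int × Int))
    (hc : ∀ v, d.getD v PySem.Dict.empty = PySem.Dict.counter (pvSums hist v)) :
    (l.foldl pvAStep (r, c, d)).1 = r + pvCountGo hist (pvPairs c l) := by
  induction l generalizing r c d hist with
  | nil => simp [pvPairs, pvCountGo]
  | cons num rest ih =>
    rw [List.foldl_cons]
    have hstep : pvAStep (r, c, d) num
        = (r + (hist.count (num, c + num - 2 * num) : Int), c + num,
           d.insert num ((PySem.Dict.counter (pvSums hist num)).insert (c + num)
             ((PySem.Dict.counter (pvSums hist num)).getD (c + num) 0 + 1))) := by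
      unfold pvAStep
      simp only [hc num]
      rw [pv_counter_if, count_pvSums]
    rw [hstep]
    have hc' : ∀ v, (d.insert num ((PySem.Dict.counter (pvSums hist num)).insert (c + num)
          ((PySem.Dict.counter (pvSums hist num)).getD (c + num) 0 + 1))).getD v PySem.Dict.empty
        = PySem.Dict.counter (pvSums (hist ++ [(num, c + num)]) v) := by
      intro v
      by_cases h : v = num
      · subst h
        rw [PySem.Dict.getD_insert_self, pvSums_append]
        rw [← PySem.Dict.foldl_insert_getD_add_one_eq_counter,
            ← PySem.Dict.foldl_insert_getD_add_one_eq_counter, List.foldl_append]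
        simp
      · rw [PySem.Dict.getD_insert]
        rw [if_neg h, hc v, pvSums_append]
        simp [h]
    rw [ih _ _ _ _ hc']
    simp [pvPairs, pvCountGo, add_assoc]

lemma pvA_eq (nums : List Int) : countGoodSubarray nums = pvCountGo [] (pvPairs 0 nums) := by
  unfold countGoodSubarray
  have := pvAloop nums 0 0 PySem.Dict.empty []
    (by intro v; simp [pvSums, PySem.Dict.getD_empty]; rfl)
  simpa using this

-- B-side: the prefix-sum list is 0 followed by the trace's sums
lemma pvPre_build (l : List Int) (acc : List Int) (hne : acc ≠ []) :
    l.foldl (fun acc x => acc ++ [PySem.List.pyGetD acc (-1) 0 + x]) acc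
      = acc ++ (pvPairs (acc.getLast hne) l).map Prod.snd := by
  induction l generalizing acc with
  | nil => simp [pvPairs]
  | cons x r ih =>
    rw [List.foldl_cons, PySem.List.pyGetD_neg_one acc 0 hne]
    have hne' : acc ++ [acc.getLast hne + x] ≠ [] := by simp
    rw [ih _ hne']
    simp [pvPairs]

lemma pvCountGo_append (seen l : List (Int × Int)) (p : Int × Int) :
    pvCountGo seen (l ++ [p])
      = pvCountGo seen l + ((seen ++ l).count (p.1, p.2 - 2 * p.1) : Int) := by
  induction l generalizing seen with
  | nil => simp [pvCountGo]
  | cons q r ih =>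
    rw [List.cons_append]
    simp only [pvCountGo]
    rw [ih, List.append_assoc, List.singleton_append]
    ring

lemma pvB_eq (nums : List Int) : countGoodSubarray_alt nums = pvCountGo [] (pvPairs 0 nums) := by
  unfold countGoodSubarray_alt
  have hpre := pvPre_build nums [0] (by simp)
  simp only [List.getLast_singleton] at hpre
  rw [hpre]
  set T := pvPairs 0 nums with hT
  set pre : List Int := [0] ++ T.map Prod.snd with hpre'
  have hTlen : T.length = nums.length := pvPairs_length 0 nums
  have hTget : ∀ k (h : k < nums.length),
      T[k]'(by rw [hTlen]; exact h) = (nums[k], (nums.take (k + 1)).sum) := by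
    intro k h
    have := pvPairs_getElem 0 nums k h
    simpa using this
  have hpreD : ∀ k, k ≤ nums.length → pre.getD k 0 = (nums.take k).sum := by
    intro k hk
    cases k with
    | zero => simp [hpre']
    | succ k =>
      have hk' : k < nums.length := by omega
      have hk'' : k < (T.map Prod.snd).length := by simp [hTlen]; exact hk'
      simp only [hpre', List.singleton_append, List.getD_cons_succ]
      rw [List.getD_eq_getElem _ _ hk'']
      simp only [List.getElem_map]
      rw [hTget k hk']
  -- the key of pvCountGo's step at position m, as B's inner condition sees it
  have hkey : ∀ m (hm : m < nums.length),
      ((T[m]'(by rw [hTlen]; exact hm)).1,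
        (T[m]'(by rw [hTlen]; exact hm)).2 - 2 * (T[m]'(by rw [hTlen]; exact hm)).1)
      = (nums[m], (nums.take m).sum - nums[m]) := by
    intro m hm
    rw [hTget m hm]
    have : (nums.take (m + 1)).sum = (nums.take m).sum + nums[m] :=
      List.sum_take_succ nums m hm
    simp [this]
    ring
  -- inner loop: counts occurrences of the key in the first m trace entries
  have hinner : ∀ (m : Nat) (hm : m < nums.length) (k : Nat), k ≤ m → ∀ (res : Int),
      (PySem.List.pyRange 0 (k : Int) 1).foldl (fun res i =>
        if PySem.List.pyGetD nums i 0 = PySem.List.pyGetD nums (m : Int) 0 ∧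
           PySem.List.pyGetD pre (m : Int) 0 - PySem.List.pyGetD pre (i + 1) 0
             = PySem.List.pyGetD nums (m : Int) 0
        then res + 1 else res) res
      = res + ((T.take k).count (nums[m], (nums.take m).sum - nums[m]) : Int) := by
    intro m hm k hk
    induction k with
    | zero => intro res; simp [PySem.List.pyRange_one_eq_nil]
    | succ k ihk =>
      intro res
      have hcast : ((k : Int) + 1) = ((k + 1 : Nat) : Int) := by push_cast; ring
      rw [show ((k + 1 : Nat) : Int) = (k : Int) + 1 by push_cast; ring,
          PySem.List.pyRange_one_succ_right (a := 0) (b := (k : Int)) (by positivity),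
          List.foldl_append, ihk (by omega) res]
      simp only [List.foldl_cons, List.foldl_nil]
      have hkm : k < nums.length := by omega
      have hik : k < T.length := by rw [hTlen]; exact hkm
      -- rewrite the condition at i = k
      have hnk : PySem.List.pyGetD nums (k : Int) 0 = nums[k] := by
        simp [PySem.List.pyGetD_natCast, List.getElem?_eq_getElem hkm]
      have hnm : PySem.List.pyGetD nums (m : Int) 0 = nums[m] := by
        simp [PySem.List.pyGetD_natCast, List.getElem?_eq_getElem hm]
      have hpm : PySem.List.pyGetD pre (m : Int) 0 = (nums.take m).sum := by
        simp only [PySem.List.pyGetD_natCast]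
        exact hpreD m (by omega)
      have hpk : PySem.List.pyGetD pre ((k : Int) + 1) 0 = (nums.take (k + 1)).sum := by
        rw [hcast]
        simp only [PySem.List.pyGetD_natCast]
        exact hpreD (k + 1) (by omega)
      rw [hnk, hnm, hpm, hpk]
      have htake : T.take (k + 1) = T.take k ++ [T[k]'hik] := by
        rw [List.take_add_one, List.getElem?_eq_getElem hik, Option.toList_some]
      rw [htake, List.count_append, List.count_singleton]
      have hcond : (nums[k] = nums[m] ∧
            (nums.take m).sum - (nums.take (k + 1)).sum = nums[m])
          ↔ (T[k]'hik) = (nums[m], (nums.take m).sum - nums[m]) := by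
        rw [hTget k hkm, Prod.ext_iff]
        constructor
        · rintro ⟨h1, h2⟩; exact ⟨h1, by omega⟩
        · rintro ⟨h1, h2⟩; exact ⟨h1, by omega⟩
      by_cases hc : nums[k] = nums[m] ∧
          (nums.take m).sum - (nums.take (k + 1)).sum = nums[m]
      · have heq := hcond.mp hc
        rw [if_pos hc]
        simp [heq]
        ring
      · have hne := hcond.not.mp hc
        rw [if_neg hc]
        simp
        exact hne
  -- outer loop
  have houter : ∀ (m : Nat), m ≤ nums.length → ∀ (res : Int),
      (PySem.List.pyRange 0 (m : Int) 1).foldl (fun res j =>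
        (PySem.List.pyRange 0 j 1).foldl (fun res i =>
          if PySem.List.pyGetD nums i 0 = PySem.List.pyGetD nums j 0 ∧
             PySem.List.pyGetD pre j 0 - PySem.List.pyGetD pre (i + 1) 0
               = PySem.List.pyGetD nums j 0
          then res + 1 else res) res) res
      = res + pvCountGo [] (T.take m) := by
    intro m
    induction m with
    | zero => intro _ res; simp [PySem.List.pyRange_one_eq_nil, pvCountGo]
    | succ m ihm =>
      intro hm res
      have hmn : m < nums.length := by omega
      have him : m < T.length := by rw [hTlen]; exact hmn
      rw [show ((m + 1 : Nat) : Int) = (m : Int) + 1 by push_cast; ring,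
          PySem.List.pyRange_one_succ_right (a := 0) (b := (m : Int)) (by positivity),
          List.foldl_append, ihm (by omega) res]
      simp only [List.foldl_cons, List.foldl_nil]
      rw [hinner m hmn m (le_refl m) _]
      have htake : T.take (m + 1) = T.take m ++ [T[m]'him] := by
        rw [List.take_add_one, List.getElem?_eq_getElem him, Option.toList_some]
      rw [htake, pvCountGo_append]
      rw [show ([] ++ T.take m) = T.take m from by simp]
      rw [hkey m hmn]
      ring
  have := houter nums.length (le_refl _) 0
  simp only [PySem.List.len_eq] at *
  rw [this]
  simp [List.take_of_length_le (le_of_eq hTlen)]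

-- ===== VERDICT (by name: the statement is the Claim_ definition above) =====
theorem countGoodSubarray_spec : Claim_equal_countGoodSubarray := by
  intro nums _
  unfold Spec_countGoodSubarray
  rw [pvA_eq, pvB_eq]
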